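-- pv_equiv track=rewrite | github.com/caonhathao/detect-anomalous-application-logging | demo/v7-only-ai/analyzer.py | split_requests_rfc
-- ===== SOURCE A (Python) =====
-- def split_requests_rfc(content):
--     """
--     Tách request theo block:
--     SAFE|
--     POST ...
--     Headers
--     ...
--     (rỗng)
--     MALICIOUS|
--     GET ...
--     Headers
--     """
--     reqs = []
--     current = []
--
--     lines = content.splitlines()
--
--     for line in lines:
--         # Nếu là dòng NHÃN → bắt đầu request mới
--         if line.strip() in ("SAFE|", "MALICIOUS|"):
--             # Nếu block cũ tồn tại → thêm vào list
--             if current: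
--                 reqs.append("\n".join(current).strip())
--                 current = []
--
--         current.append(line)
--
--     # Block cuối
--     if current:
--         reqs.append("\n".join(current).strip())
--
--     return reqs
-- ===== SOURCE B (Python) =====
-- _LABELS = ("SAFE|", "MALICIOUS|")
--
-- def split_requests_rfc(content):
--     # Span-then-recurse decomposition: each block is its first line plus the
--     # following run of non-label lines; then move on to the remainder.
--     lines = content.splitlines()
--     blocks = []
--     rest = lines
--     while rest:
--         n = 1
--         while n < len(rest) and rest[n].strip() not in _LABELS:
--             n += 1
--         blocks.append("\n".join(rest[:n]).strip())
--         rest = rest[n:]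
--     return blocks
-- ===== Notes on version B (the rewrite author's own statement) =====
-- stated objective: alternative
-- what changed: Replaced the stateful accumulate-and-flush loop (current buffer flushed into reqs at each label line and at the end) by a span-then-advance decomposition: repeatedly take the block's first line plus the following run of non-label lines, join/strip it, and move to the remainder.
import Mathlib
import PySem

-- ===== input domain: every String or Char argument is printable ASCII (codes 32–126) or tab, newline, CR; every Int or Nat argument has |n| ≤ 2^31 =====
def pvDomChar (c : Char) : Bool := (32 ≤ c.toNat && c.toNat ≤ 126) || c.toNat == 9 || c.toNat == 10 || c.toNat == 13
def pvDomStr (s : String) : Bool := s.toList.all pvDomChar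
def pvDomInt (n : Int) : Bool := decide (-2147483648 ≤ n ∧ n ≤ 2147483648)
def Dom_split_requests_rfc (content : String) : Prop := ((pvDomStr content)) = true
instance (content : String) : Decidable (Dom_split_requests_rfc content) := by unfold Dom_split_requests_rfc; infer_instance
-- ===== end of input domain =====

-- B replaces A's accumulate-and-flush loop by a span-then-advance decomposition (objective: alternative; same cost).

-- ===== PORT A =====
-- loop body of A's for-loop: flush `current` into `reqs` at a label line, then append the line
def pvStepA (st : List String × List String) (line : String) : List String × List String :=
  let st1 :=
    if PySem.Str.strip line = "SAFE|" ∨ PySem.Str.strip line = "MALICIOUS|" then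
      (if st.2 ≠ [] then (st.1 ++ [PySem.Str.strip (PySem.Str.join "\n" st.2)], ([] : List String)) else st)
    else st
  (st1.1, st1.2 ++ [line])

def split_requests_rfc (content : String) : List String :=
  let lines := PySem.Str.splitlines content
  let st := lines.foldl pvStepA ([], [])
  if st.2 ≠ [] then st.1 ++ [PySem.Str.strip (PySem.Str.join "\n" st.2)] else st.1

-- ===== PORT B =====
-- Source B: label test shared via _LABELS
def pvIsLabel (line : String) : Bool :=
  PySem.Str.strip line == "SAFE|" || PySem.Str.strip line == "MALICIOUS|"

-- Source B's inner while loop: length of the run of non-label lines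
def pvSpanLen : List String → Nat
  | [] => 0
  | x :: t => if pvIsLabel x then 0 else 1 + pvSpanLen t

-- Source B's outer while loop: emit the block rest[:n], continue on rest[n:]
def pvBlocks : List String → List String
  | [] => []
  | x :: t =>
    PySem.Str.strip (PySem.Str.join "\n" ((x :: t).take (1 + pvSpanLen t)))
      :: pvBlocks ((x :: t).drop (1 + pvSpanLen t))
termination_by rest => rest.length
decreasing_by
  simp only [List.length_cons, List.length_drop]
  omega

def split_requests_rfc_alt (content : String) : List String :=
  pvBlocks (PySem.Str.splitlines content)

-- ===== PRECONDITION & SPEC =====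
def Spec_split_requests_rfc (content : String) (out : List String) : Prop := out = split_requests_rfc_alt content
instance (content : String) (out : List String) : Decidable (Spec_split_requests_rfc content out) := by unfold Spec_split_requests_rfc; infer_instance

-- ===== CLAIM (what is proved, stated in full; the proofs are below) =====
def Claim_equal_split_requests_rfc : Prop := ∀ (content : String), Dom_split_requests_rfc content → Spec_split_requests_rfc content (split_requests_rfc content)

-- ===== LEMMAS AND PROOFS =====

-- shorthand for "\n".join(cur).strip()
def pvFlush (cur : List String) : String := PySem.Str.strip (PySem.Str.join "\n" cur)

-- A's trailing "if current: reqs.append(...)"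
def pvFinal (st : List String × List String) : List String :=
  if st.2 ≠ [] then st.1 ++ [pvFlush st.2] else st.1

-- A's loop as a recursion over the remaining lines, with a nonempty current block
def pvRunA (cur : List String) : List String → List String
  | [] => [pvFlush cur]
  | l :: t => if pvIsLabel l then pvFlush cur :: pvRunA [l] t else pvRunA (cur ++ [l]) t

theorem pvStepA_eq (st : List String × List String) (line : String) :
    pvStepA st line =
      if pvIsLabel line then
        (if st.2 ≠ [] then (st.1 ++ [pvFlush st.2], [line]) else (st.1, st.2 ++ [line]))
      else (st.1, st.2 ++ [line]) := by
  simp only [pvStepA, pvIsLabel, pvFlush, Bool.or_eq_true, beq_iff_eq]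
  split_ifs <;> simp_all

theorem pvFoldA_inv (ls : List String) :
    ∀ (reqs cur : List String), cur ≠ [] →
      pvFinal (ls.foldl pvStepA (reqs, cur)) = reqs ++ pvRunA cur ls := by
  induction ls with
  | nil => intro reqs cur h; simp [pvFinal, pvRunA, h]
  | cons l t ih =>
    intro reqs cur h
    simp only [List.foldl_cons, pvRunA]
    rw [pvStepA_eq]
    by_cases hl : pvIsLabel l = true
    · simp only [hl, h, ne_eq, not_false_iff, if_pos]
      rw [ih (reqs ++ [pvFlush cur]) [l] (by simp)]
      simp
    · simp only [hl, Bool.false_eq_true, if_false]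
      rw [ih reqs (cur ++ [l]) (by simp)]

theorem pvBlocks_cons (x : String) (t : List String) :
    pvBlocks (x :: t) =
      pvFlush (x :: t.take (pvSpanLen t)) :: pvBlocks (t.drop (pvSpanLen t)) := by
  rw [pvBlocks]
  simp [pvFlush, List.take_succ_cons, List.drop_succ_cons, Nat.add_comm 1 (pvSpanLen t)]

theorem pvRunA_eq_blocks (ls : List String) :
    ∀ (cur : List String), cur ≠ [] →
      pvRunA cur ls = pvFlush (cur ++ ls.take (pvSpanLen ls)) :: pvBlocks (ls.drop (pvSpanLen ls)) := by
  induction ls with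
  | nil => intro cur h; simp [pvRunA, pvSpanLen, pvBlocks]
  | cons l t ih =>
    intro cur h
    by_cases hl : pvIsLabel l = true
    · simp only [pvRunA, hl, pvSpanLen, if_pos, List.take_zero, List.drop_zero,
        List.append_nil]
      rw [ih [l] (by simp), pvBlocks_cons]
      simp
    · simp only [pvRunA, hl, Bool.false_eq_true, if_false, pvSpanLen]
      rw [ih (cur ++ [l]) (by simp)]
      simp [List.append_assoc, Nat.add_comm 1 (pvSpanLen t)]

theorem split_eq (content : String) :
    split_requests_rfc content = split_requests_rfc_alt content := by
  unfold split_requests_rfc split_requests_rfc_alt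
  cases hls : PySem.Str.splitlines content with
  | nil => simp [pvBlocks]
  | cons l t =>
    have hfirst : pvStepA ([], []) l = ([], [l]) := by
      rw [pvStepA_eq]; split_ifs <;> simp_all
    show pvFinal ((l :: t).foldl pvStepA ([], [])) = pvBlocks (l :: t)
    rw [List.foldl_cons, hfirst, pvFoldA_inv t [] [l] (by simp), List.nil_append,
      pvRunA_eq_blocks t [l] (by simp), pvBlocks_cons, List.singleton_append]

-- ===== VERDICT (by name: the statement is the Claim_ definition above) =====
theorem split_requests_rfc_spec : Claim_equal_split_requests_rfc := by
  intro content _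
  unfold Spec_split_requests_rfc
  exact split_eq content
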